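-- pv_equiv track=rewrite | github.com/andrewXiaY/Data-Structures-and-Algorithms | Leetcode/leetcode1641.py | solve
-- ===== SOURCE A (Python) =====
-- def solve(n, vowel, dp):
--     if n == 1:
--         return vowel
--     if vowel == 1:
--         return 1
--     if dp[n][vowel] != 0:
--         return dp[n][vowel]
--
--     dp[n][vowel] = solve(n - 1, vowel, dp) + solve(n, vowel - 1, dp)
--     return dp[n][vowel]
-- ===== SOURCE B (Python) =====
-- def solve(n, vowel, dp):
--     # Iterative version of the memoized recurrence over the shared table dp:
--     # a cached (nonzero) cell is returned as-is; otherwise the table is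
--     # filled bottom-up in place and the requested cell read off.
--     if n == 1:
--         return vowel
--     if vowel == 1:
--         return 1
--     if dp[n][vowel] != 0:
--         return dp[n][vowel]
--     for i in range(2, n + 1):
--         for j in range(2, vowel + 1):
--             if dp[i][j] == 0:
--                 above = j if i == 2 else dp[i - 1][j]
--                 left = 1 if j == 2 else dp[i][j - 1]
--                 dp[i][j] = above + left
--     return dp[n][vowel]
-- ===== Notes on version B (the rewrite author's own statement) =====
-- stated objective: alternative
-- what changed: Replaces A's memoized top-down recursion with an iterative bottom-up in-place fill of the same shared memo table: base cases and the dp[n][vowel] cache check stay, but the recursion becomes two nested loops that fill every uncached cell of the 2..n x 2..vowel rectangle row by row; Pre_ excludes the inputs where A raises (IndexError / unbounded recursion) plus the rare ragged tables A survives only because a deeper stale memo entry stops its recursion right before a missing row - B's rectangle fill raises IndexError there.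
-- outside the precondition, e.g. on solve(4, 2, [[], [], [], [0, 0, 9], [0, 0, 0]]): A returns 10, B raises IndexError
import Mathlib
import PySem

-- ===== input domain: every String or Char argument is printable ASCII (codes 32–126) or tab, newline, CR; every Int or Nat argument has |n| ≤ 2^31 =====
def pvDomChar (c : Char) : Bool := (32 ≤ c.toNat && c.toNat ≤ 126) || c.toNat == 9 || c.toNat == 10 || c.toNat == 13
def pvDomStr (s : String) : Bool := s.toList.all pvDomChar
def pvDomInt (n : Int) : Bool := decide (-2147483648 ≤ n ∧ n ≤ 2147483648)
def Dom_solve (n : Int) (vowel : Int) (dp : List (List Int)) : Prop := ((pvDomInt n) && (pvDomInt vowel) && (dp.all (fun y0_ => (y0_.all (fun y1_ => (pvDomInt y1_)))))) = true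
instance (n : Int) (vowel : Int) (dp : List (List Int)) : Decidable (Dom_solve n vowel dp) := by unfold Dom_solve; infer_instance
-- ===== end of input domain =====

-- B replaces A's memoized top-down recursion by an iterative bottom-up in-place fill of
-- the same memo table (recursion → loops); equal RETURN values are proved — B fills
-- every uncached cell of the 2..n × 2..vowel rectangle while A writes only the cells its
-- recursion visits, so the two mutate the shared dp argument differently.

-- ===== PORT A =====
-- A's memoized recursion, with the mutated dp list threaded through explicitly; the memo
-- read dp[n][vowel] is ported with PySem.List.pyGet? (Python indexing: negative wrap,
-- none = IndexError, where the port stops with 0 — those inputs are outside Pre_solve),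
-- the write dp[n][vowel] = … with PySem.List.pySetD.  fuel only makes the recursion
-- structural: n.toNat + vowel.toNat + 1 bounds the depth wherever Python's terminates.
def solveSt : Nat → Int → Int → List (List Int) → Int × List (List Int)
  | 0, _, _, dp => (0, dp)
  | fuel+1, n, vowel, dp =>
    if n = 1 then (vowel, dp)
    else if vowel = 1 then (1, dp)
    else
      match PySem.List.pyGet? dp n with
      | none => (0, dp)
      | some row =>
        match PySem.List.pyGet? row vowel with
        | none => (0, dp)
        | some v =>
          if v ≠ 0 then (v, dp)
          else
            let r1 := solveSt fuel (n - 1) vowel dp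
            let r2 := solveSt fuel n (vowel - 1) r1.2
            let s := r1.1 + r2.1
            (s, PySem.List.pySetD r2.2 n
              (PySem.List.pySetD (PySem.List.pyGetD r2.2 n []) vowel s))

def solve (n : Int) (vowel : Int) (dp : List (List Int)) : Int :=
  (solveSt (n.toNat + vowel.toNat + 1) n vowel dp).1

-- ===== PORT B =====
-- Source B: base cases, the memo check dp[n][vowel] != 0 (Python indexing, as in port A),
-- then the bottom-up row-major in-place fill of rows 2..n, columns 2..vowel, and the
-- final read dp[n][vowel].  The loop body's reads/writes use pyGetD/pySetD (exact on the
-- in-range indices Pre_solve guarantees).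
def solve_alt (n : Int) (vowel : Int) (dp : List (List Int)) : Int :=
  if n = 1 then vowel
  else if vowel = 1 then 1
  else
    match PySem.List.pyGet? dp n with
    | none => 0
    | some row =>
      match PySem.List.pyGet? row vowel with
      | none => 0
      | some v =>
        if v ≠ 0 then v
        else
          let dp' := (PySem.List.pyRange 2 (n + 1) 1).foldl (fun dp i =>
            (PySem.List.pyRange 2 (vowel + 1) 1).foldl (fun dp j =>
              if PySem.List.pyGetD (PySem.List.pyGetD dp i []) j 0 = 0 then
                let above := if i = 2 then j
                  else PySem.List.pyGetD (PySem.List.pyGetD dp (i - 1) []) j 0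
                let left := if j = 2 then 1
                  else PySem.List.pyGetD (PySem.List.pyGetD dp i []) (j - 1) 0
                PySem.List.pySetD dp i
                  (PySem.List.pySetD (PySem.List.pyGetD dp i []) j (above + left))
              else dp) dp) dp
          PySem.List.pyGetD (PySem.List.pyGetD dp' n []) vowel 0

-- ===== PRECONDITION & SPEC =====
-- dp[n][vowel] under Python's indexing (wraparound), 0 when the index pair is invalid
def topCell (n : Int) (vowel : Int) (dp : List (List Int)) : Int :=
  (PySem.List.pyGet? ((PySem.List.pyGet? dp n).getD []) vowel).getD 0

-- Pre_solve admits the base cases, tables whose 2..n x 2..vowel rectangle is fully in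
-- range (both programs complete the fill), and tables whose cell dp[n][vowel] (Python
-- indexing) holds a nonzero cached value (both return it at once).  It excludes only
-- inputs on which A raises (IndexError on a missing row/cell the recursion reaches,
-- unbounded recursion below the 1/1 base cases) and the rare ragged tables A survives
-- only because a deeper stale memo entry stops its recursion right before a missing
-- row — B's rectangle fill raises IndexError there.
def Pre_solve (n : Int) (vowel : Int) (dp : List (List Int)) : Prop :=
  n = 1 ∨ vowel = 1 ∨
    (2 ≤ n ∧ 2 ≤ vowel ∧ n.toNat < dp.length ∧
      ∀ i < n.toNat + 1, 2 ≤ i → vowel.toNat < (dp.getD i []).length) ∨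
    topCell n vowel dp ≠ 0
instance (n : Int) (vowel : Int) (dp : List (List Int)) : Decidable (Pre_solve n vowel dp) := by
  unfold Pre_solve; infer_instance
def pvWitness_solve : Int × Int × List (List Int) := (2, 2, [[0], [0], [0, 0, 0]])

def Spec_solve (n : Int) (vowel : Int) (dp : List (List Int)) (out : Int) : Prop := out = solve_alt n vowel dp
instance (n : Int) (vowel : Int) (dp : List (List Int)) (out : Int) : Decidable (Spec_solve n vowel dp out) := by unfold Spec_solve; infer_instance

-- ===== CLAIM (what is proved, stated in full; the proofs are below) =====
def Claim_equal_solve : Prop := ∀ (n : Int) (vowel : Int) (dp : List (List Int)), Dom_solve n vowel dp → Pre_solve n vowel dp → Spec_solve n vowel dp (solve n vowel dp)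

-- ===== LEMMAS AND PROOFS =====

-- The mathematical value both programs compute: the recurrence cut off by the nonzero
-- cells of the ORIGINAL table (reading, but never writing, dp).
def fDP (dp : List (List Int)) (i j : Int) : Int :=
  if i ≤ 1 then j
  else if j ≤ 1 then 1
  else
    let v := PySem.List.pyGetD (PySem.List.pyGetD dp i []) j 0
    if v ≠ 0 then v
    else fDP dp (i - 1) j + fDP dp i (j - 1)
termination_by (i + j).toNat
decreasing_by all_goals omega

lemma get2_nonneg (dp : List (List Int)) (i j : Int) (hi : 0 ≤ i) (hj : 0 ≤ j) :
    PySem.List.pyGetD (PySem.List.pyGetD dp i []) j 0 = (dp.getD i.toNat []).getD j.toNat 0 := by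
  lift i to ℕ using hi
  lift j to ℕ using hj
  simp [PySem.List.pyGetD_natCast, List.getD_eq_getElem?_getD]

-- dp is an "f-consistent" evolution of dp0: lengths are unchanged and every cell is
-- either untouched or was 0 in dp0 and now holds its f-value.
def MemInv (dp0 dp : List (List Int)) : Prop :=
  dp.length = dp0.length ∧
  (∀ i : Nat, (dp.getD i []).length = (dp0.getD i []).length) ∧
  (∀ i j : Nat, (dp.getD i []).getD j 0 = (dp0.getD i []).getD j 0 ∨
     ((dp0.getD i []).getD j 0 = 0 ∧ (dp.getD i []).getD j 0 = fDP dp0 (i : Int) (j : Int)))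

lemma fDP_base1 (dp : List (List Int)) (i j : Int) (h1 : i ≤ 1) : fDP dp i j = j := by
  rw [fDP]; simp [h1]

lemma fDP_base2 (dp : List (List Int)) (i j : Int) (h1 : ¬ i ≤ 1) (h2 : j ≤ 1) : fDP dp i j = 1 := by
  rw [fDP]; simp [h1, h2]

lemma fDP_rec (dp : List (List Int)) (i j : Int) (h1 : ¬ i ≤ 1) (h2 : ¬ j ≤ 1) :
    fDP dp i j = if PySem.List.pyGetD (PySem.List.pyGetD dp i []) j 0 ≠ 0
      then PySem.List.pyGetD (PySem.List.pyGetD dp i []) j 0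
      else fDP dp (i - 1) j + fDP dp i (j - 1) := by
  rw [fDP]; simp [h1, h2]

lemma pyGetD_nn {α : Type} (xs : List α) (i : Int) (d : α) (hi : 0 ≤ i) :
    PySem.List.pyGetD xs i d = xs.getD i.toNat d := by
  lift i to ℕ using hi
  simp [PySem.List.pyGetD_natCast, List.getD_eq_getElem?_getD]

lemma getD_set_ne (l : List (List Int)) (n m : Nat) (r : List Int) (h : n ≠ m) :
    (l.set n r).getD m [] = l.getD m [] := by
  rw [List.getD_eq_getElem?_getD, List.getD_eq_getElem?_getD, List.getElem?_set_ne h]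

lemma getD_set_self (l : List (List Int)) (n : Nat) (r : List Int) :
    (l.set n r).getD n [] = if n < l.length then r else l.getD n [] := by
  by_cases h : n < l.length
  · rw [List.getD_eq_getElem?_getD, List.getElem?_set_self h, if_pos h]; rfl
  · rw [List.set_eq_of_length_le (by omega), if_neg h]

lemma MemInv_write (dp0 dp : List (List Int)) (h : MemInv dp0 dp) (i j s : Int)
    (hi : 2 ≤ i) (hj : 2 ≤ j) (h0 : (dp0.getD i.toNat []).getD j.toNat 0 = 0)
    (hs : s = fDP dp0 i j) :
    MemInv dp0 (PySem.List.pySetD dp i (PySem.List.pySetD (PySem.List.pyGetD dp i []) j s)) := by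
  have hrow : PySem.List.pyGetD dp i [] = dp.getD i.toNat [] := pyGetD_nn _ _ _ (by omega)
  have hset1 : PySem.List.pySetD (dp.getD i.toNat []) j s = (dp.getD i.toNat []).set j.toNat s :=
    PySem.List.pySetD_of_nonneg _ _ (by omega)
  have hset2 : PySem.List.pySetD dp i ((dp.getD i.toNat []).set j.toNat s)
      = dp.set i.toNat ((dp.getD i.toNat []).set j.toNat s) :=
    PySem.List.pySetD_of_nonneg _ _ (by omega)
  rw [hrow, hset1, hset2]
  obtain ⟨hlen, hrows, hcells⟩ := h
  refine ⟨by rw [List.length_set]; exact hlen, ?_, ?_⟩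
  · intro m
    rcases eq_or_ne i.toNat m with rfl | hm
    · rw [getD_set_self]
      split_ifs with hlt
      · rw [List.length_set]; exact hrows _
      · exact hrows _
    · rw [getD_set_ne _ _ _ _ hm]; exact hrows _
  · intro m l
    rcases eq_or_ne i.toNat m with rfl | hm
    · rw [getD_set_self]
      split_ifs with hlt
      · rcases eq_or_ne j.toNat l with rfl | hl
        · by_cases hjl : j.toNat < (dp.getD i.toNat []).length
          · right
            refine ⟨h0, ?_⟩
            rw [List.getD_eq_getElem?_getD, List.getElem?_set_self hjl]
            simp [hs, Int.toNat_of_nonneg (show (0:Int) ≤ i by omega),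
              Int.toNat_of_nonneg (show (0:Int) ≤ j by omega)]
          · rw [List.set_eq_of_length_le (by omega)]; exact hcells _ _
        · rw [List.getD_eq_getElem?_getD, List.getElem?_set_ne hl,
            ← List.getD_eq_getElem?_getD]
          exact hcells _ _
      · exact hcells _ _
    · rw [getD_set_ne _ _ _ _ hm]; exact hcells _ _

lemma solveSt_succ (fuel : Nat) (n vowel : Int) (dp : List (List Int)) :
    solveSt (fuel + 1) n vowel dp =
      if n = 1 then (vowel, dp)
      else if vowel = 1 then (1, dp)
      else
        match PySem.List.pyGet? dp n with
        | none => (0, dp)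
        | some row =>
          match PySem.List.pyGet? row vowel with
          | none => (0, dp)
          | some v =>
            if v ≠ 0 then (v, dp)
            else
              let r1 := solveSt fuel (n - 1) vowel dp
              let r2 := solveSt fuel n (vowel - 1) r1.2
              let s := r1.1 + r2.1
              (s, PySem.List.pySetD r2.2 n
                (PySem.List.pySetD (PySem.List.pyGetD r2.2 n []) vowel s)) := rfl

lemma solveSt_main (dp0 : List (List Int)) (N V : Int) (hN : 2 ≤ N) (hV : 2 ≤ V)
    (hlen : N.toNat < dp0.length)
    (hrowsN : ∀ i < N.toNat + 1, 2 ≤ i → V.toNat < (dp0.getD i []).length) :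
    ∀ fuel : Nat, ∀ i j : Int, ∀ dp : List (List Int), MemInv dp0 dp →
      1 ≤ i → i ≤ N → 1 ≤ j → j ≤ V →
      (i + j).toNat ≤ fuel →
      (solveSt fuel i j dp).1 = fDP dp0 i j ∧ MemInv dp0 (solveSt fuel i j dp).2 := by
  intro fuel
  induction fuel with
  | zero => intro i j dp _ hi _ hj _ hk; omega
  | succ fuel ih =>
    intro i j dp hInv hi hiN hj hjV hk
    rw [solveSt_succ]
    by_cases h1 : i = 1
    · simp only [h1, if_true]
      exact ⟨(fDP_base1 dp0 1 j (by omega)).symm, hInv⟩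
    · by_cases h2 : j = 1
      · simp only [if_neg h1, h2, if_true]
        exact ⟨(fDP_base2 dp0 i 1 (by omega) (by omega)).symm, hInv⟩
      · have h1' : ¬ i ≤ 1 := by omega
        have h2' : ¬ j ≤ 1 := by omega
        have hg0 := get2_nonneg dp0 i j (by omega) (by omega)
        have hL : dp.length = dp0.length := hInv.1
        have hR : (dp.getD i.toNat []).length = (dp0.getD i.toNat []).length := hInv.2.1 _
        have hr := hrowsN i.toNat (by omega) (by omega)
        have hiLt : i.toNat < dp.length := by omega
        have hjLt : j.toNat < (dp.getD i.toNat []).length := by omega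
        have hget1 : PySem.List.pyGet? dp i = some (dp.getD i.toNat []) := by
          rw [PySem.List.pyGet?_eq_some_getElem dp (by omega) (by exact_mod_cast by omega),
            List.getD_eq_getElem dp [] hiLt]
        have hget2 : PySem.List.pyGet? (dp.getD i.toNat []) j
            = some ((dp.getD i.toNat []).getD j.toNat 0) := by
          rw [PySem.List.pyGet?_eq_some_getElem _ (by omega) (by exact_mod_cast by omega),
            List.getD_eq_getElem _ 0 hjLt]
        simp only [if_neg h1, if_neg h2, hget1, hget2]
        by_cases hz : (dp.getD i.toNat []).getD j.toNat 0 ≠ 0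
        · simp only [if_pos hz]
          refine ⟨?_, hInv⟩
          rcases hInv.2.2 i.toNat j.toNat with hc | ⟨hc0, hcv⟩
          · rw [fDP_rec dp0 i j h1' h2', hg0, ← hc, if_pos hz]
          · rw [Int.toNat_of_nonneg (show (0:Int) ≤ i by omega),
              Int.toNat_of_nonneg (show (0:Int) ≤ j by omega)] at hcv
            rw [hcv]
        · simp only [if_neg hz]
          rw [not_not] at hz
          have hc0 : (dp0.getD i.toNat []).getD j.toNat 0 = 0 := by
            rcases hInv.2.2 i.toNat j.toNat with hc | ⟨hc0, _⟩
            · rw [← hc]; exact hz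
            · exact hc0
          obtain ⟨e1, hInv1⟩ := ih (i - 1) j dp hInv (by omega) (by omega) hj hjV (by omega)
          obtain ⟨e2, hInv2⟩ := ih i (j - 1) (solveSt fuel (i - 1) j dp).2 hInv1 hi hiN
            (by omega) (by omega) (by omega)
          have hs : (solveSt fuel (i - 1) j dp).1
              + (solveSt fuel i (j - 1) (solveSt fuel (i - 1) j dp).2).1 = fDP dp0 i j := by
            rw [e1, e2, fDP_rec dp0 i j h1' h2', hg0, hc0]; simp
          exact ⟨hs, MemInv_write dp0 _ hInv2 i j _ (by omega) (by omega) hc0 hs⟩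

-- ===== B side: the bottom-up fill =====

-- One fill step of Source B's inner loop body
def fillStep (i : Int) (dp : List (List Int)) (j : Int) : List (List Int) :=
  if PySem.List.pyGetD (PySem.List.pyGetD dp i []) j 0 = 0 then
    PySem.List.pySetD dp i
      (PySem.List.pySetD (PySem.List.pyGetD dp i []) j
        ((if i = 2 then j else PySem.List.pyGetD (PySem.List.pyGetD dp (i - 1) []) j 0)
          + (if j = 2 then 1 else PySem.List.pyGetD (PySem.List.pyGetD dp i []) (j - 1) 0)))
  else dp

-- After processing the rectangle in row-major order up to marker (i, j), every processed
-- cell holds its fDP-value (a stale nonzero cell IS its fDP-value), every other cell is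
-- untouched, and all lengths are unchanged.
def FillInv (dp0 : List (List Int)) (n vowel i j : Int) (dp : List (List Int)) : Prop :=
  dp.length = dp0.length ∧
  (∀ a : Nat, (dp.getD a []).length = (dp0.getD a []).length) ∧
  (∀ a b : Int, 2 ≤ a → a ≤ n → 2 ≤ b → b ≤ vowel →
    (dp.getD a.toNat []).getD b.toNat 0 =
      (if a < i ∨ (a = i ∧ b ≤ j) then fDP dp0 a b
       else (dp0.getD a.toNat []).getD b.toNat 0)) ∧
  (∀ a b : Nat, (dp.getD a []).getD b 0 = (dp0.getD a []).getD b 0 ∨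
     ((dp0.getD a []).getD b 0 = 0 ∧ (dp.getD a []).getD b 0 = fDP dp0 (a : Int) (b : Int)))

lemma fDP_of_cell_ne (dp : List (List Int)) (i j : Int) (h1 : ¬ i ≤ 1) (h2 : ¬ j ≤ 1)
    (h : (dp.getD i.toNat []).getD j.toNat 0 ≠ 0) :
    fDP dp i j = (dp.getD i.toNat []).getD j.toNat 0 := by
  rw [fDP_rec dp i j h1 h2, get2_nonneg dp i j (by omega) (by omega), if_pos h]

lemma fDP_of_cell_eq (dp : List (List Int)) (i j : Int) (h1 : ¬ i ≤ 1) (h2 : ¬ j ≤ 1)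
    (h : (dp.getD i.toNat []).getD j.toNat 0 = 0) :
    fDP dp i j = fDP dp (i - 1) j + fDP dp i (j - 1) := by
  rw [fDP_rec dp i j h1 h2, get2_nonneg dp i j (by omega) (by omega), h]
  simp

-- the step preserves the invariant, advancing the marker from (i, j-1) to (i, j)
lemma fillStep_inv (dp0 : List (List Int)) (n vowel : Int) (hn : 2 ≤ n) (hv : 2 ≤ vowel)
    (hlen : n.toNat < dp0.length)
    (hrows : ∀ a < n.toNat + 1, 2 ≤ a → vowel.toNat < (dp0.getD a []).length)
    (i j : Int) (hi : 2 ≤ i) (hin : i ≤ n) (hj : 2 ≤ j) (hjv : j ≤ vowel)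
    (dp : List (List Int)) (h : FillInv dp0 n vowel i (j - 1) dp) :
    FillInv dp0 n vowel i j (fillStep i dp j) := by
  obtain ⟨hL, hRw, hCell, hMem⟩ := h
  have hiLt : i.toNat < dp.length := by omega
  have hr := hrows i.toNat (by omega) (by omega)
  have hjLt : j.toNat < (dp.getD i.toNat []).length := by rw [hRw]; omega
  have hrow : PySem.List.pyGetD dp i [] = dp.getD i.toNat [] := pyGetD_nn _ _ _ (by omega)
  have hcur : PySem.List.pyGetD (PySem.List.pyGetD dp i []) j 0
      = (dp.getD i.toNat []).getD j.toNat 0 := get2_nonneg dp i j (by omega) (by omega)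
  have hcell_ij := hCell i j hi hin hj hjv
  rw [if_neg (by omega)] at hcell_ij
  rw [fillStep]
  by_cases hz : PySem.List.pyGetD (PySem.List.pyGetD dp i []) j 0 = 0
  · -- the cell is written with fDP dp0 i j
    rw [if_pos hz]
    have hc0 : (dp0.getD i.toNat []).getD j.toNat 0 = 0 := by
      rw [hcur, hcell_ij] at hz; exact hz
    -- the value written is fDP dp0 i j
    have habove : (if i = 2 then j
        else PySem.List.pyGetD (PySem.List.pyGetD dp (i - 1) []) j 0) = fDP dp0 (i - 1) j := by
      by_cases hi2 : i = 2
      · rw [if_pos hi2, hi2, fDP_base1 dp0 (2 - 1) j (by norm_num)]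
      · rw [if_neg hi2, get2_nonneg dp (i - 1) j (by omega) (by omega)]
        have := hCell (i - 1) j (by omega) (by omega) hj hjv
        rw [if_pos (Or.inl (by omega))] at this
        rw [this]
    have hleft : (if j = 2 then (1 : Int)
        else PySem.List.pyGetD (PySem.List.pyGetD dp i []) (j - 1) 0) = fDP dp0 i (j - 1) := by
      by_cases hj2 : j = 2
      · rw [if_pos hj2, hj2, fDP_base2 dp0 i (2 - 1) (by omega) (by norm_num)]
      · rw [if_neg hj2, get2_nonneg dp i (j - 1) (by omega) (by omega)]
        have := hCell i (j - 1) hi hin (by omega) (by omega)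
        rw [if_pos (Or.inr ⟨rfl, by omega⟩)] at this
        rw [this]
    have hval : (if i = 2 then j
          else PySem.List.pyGetD (PySem.List.pyGetD dp (i - 1) []) j 0)
        + (if j = 2 then (1 : Int)
          else PySem.List.pyGetD (PySem.List.pyGetD dp i []) (j - 1) 0) = fDP dp0 i j := by
      rw [habove, hleft, fDP_of_cell_eq dp0 i j (by omega) (by omega) hc0]
    -- now the list update
    rw [hrow] at hval ⊢
    rw [PySem.List.pySetD_of_nonneg _ _ (show (0:Int) ≤ j by omega),
      PySem.List.pySetD_of_nonneg _ _ (show (0:Int) ≤ i by omega)]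
    refine ⟨by rw [List.length_set]; exact hL, ?_, ?_, ?_⟩
    · intro m
      rcases eq_or_ne i.toNat m with rfl | hm
      · rw [getD_set_self, if_pos hiLt, List.length_set]; exact hRw _
      · rw [getD_set_ne _ _ _ _ hm]; exact hRw _
    · intro a b ha han hb hbv
      rcases eq_or_ne i.toNat a.toNat with he | hne
      · have ha_eq : a = i := by omega
        subst ha_eq
        rw [getD_set_self, if_pos hiLt]
        rcases eq_or_ne j.toNat b.toNat with he2 | hne2
        · have hb_eq : b = j := by omega
          subst hb_eq
          rw [List.getD_eq_getElem?_getD, List.getElem?_set_self hjLt, Option.getD_some,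
            if_pos (Or.inr ⟨rfl, le_refl _⟩), hval]
        · rw [List.getD_eq_getElem?_getD, List.getElem?_set_ne (by omega),
            ← List.getD_eq_getElem?_getD]
          have := hCell a b ha han hb hbv
          by_cases hcase : a < a ∨ (a = a ∧ b ≤ j - 1)
          · rw [if_pos hcase] at this
            rw [this, if_pos (Or.inr ⟨rfl, by rcases hcase with h | ⟨_, h⟩ <;> omega⟩)]
          · rw [if_neg hcase] at this
            rw [this, if_neg (by
              rintro (hlt | ⟨_, hle⟩)
              · omega
              · exact hcase (Or.inr ⟨rfl, by omega⟩))]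
      · rw [getD_set_ne _ _ _ _ hne]
        have := hCell a b ha han hb hbv
        have hiff : (a < i ∨ (a = i ∧ b ≤ j - 1)) ↔ (a < i ∨ (a = i ∧ b ≤ j)) := by
          constructor
          · rintro (h | ⟨h, h'⟩)
            · exact Or.inl h
            · exact Or.inr ⟨h, by omega⟩
          · rintro (h | ⟨h, h'⟩)
            · exact Or.inl h
            · omega
        by_cases hcase : a < i ∨ (a = i ∧ b ≤ j - 1)
        · rw [if_pos hcase] at this; rw [this, if_pos (hiff.mp hcase)]
        · rw [if_neg hcase] at this; rw [this, if_neg (fun hx => hcase (hiff.mpr hx))]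
    · intro a b
      rcases eq_or_ne i.toNat a with rfl | hm
      · rw [getD_set_self, if_pos hiLt]
        rcases eq_or_ne j.toNat b with rfl | hb
        · right
          constructor
          · rw [hcur, hcell_ij] at hz; exact hz
          · rw [List.getD_eq_getElem?_getD, List.getElem?_set_self hjLt, Option.getD_some,
              show ((i.toNat : Int)) = i by omega, show ((j.toNat : Int)) = j by omega]
            exact hval
        · rw [List.getD_eq_getElem?_getD, List.getElem?_set_ne hb, ← List.getD_eq_getElem?_getD]
          exact hMem _ _
      · rw [getD_set_ne _ _ _ _ hm]; exact hMem _ _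
  · rw [if_neg hz]
    refine ⟨hL, hRw, ?_, hMem⟩
    intro a b ha han hb hbv
    have := hCell a b ha han hb hbv
    by_cases hcase : a < i ∨ (a = i ∧ b ≤ j - 1)
    · rw [if_pos hcase] at this
      rw [this, if_pos (by rcases hcase with h | ⟨h, h'⟩; exact Or.inl h; exact Or.inr ⟨h, by omega⟩)]
    · rw [if_neg hcase] at this
      by_cases hab : a = i ∧ b = j
      · obtain ⟨rfl, rfl⟩ := hab
        rw [if_pos (Or.inr ⟨rfl, le_refl _⟩)]
        have hnz : (dp0.getD a.toNat []).getD b.toNat 0 ≠ 0 := by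
          rw [hcur] at hz
          rw [← this]; exact hz
        rw [this, fDP_of_cell_ne dp0 a b (by omega) (by omega) hnz]
      · rw [this, if_neg (by
          rintro (hlt | ⟨h, h'⟩)
          · exact hcase (Or.inl hlt)
          · rcases eq_or_ne b j with rfl | hbj
            · exact hab ⟨h, rfl⟩
            · exact hcase (Or.inr ⟨h, by omega⟩))]

-- the inner loop: processes row i, columns 2..vowel
lemma inner_fill (dp0 : List (List Int)) (n vowel : Int) (hn : 2 ≤ n) (hv : 2 ≤ vowel)
    (hlen : n.toNat < dp0.length)
    (hrows : ∀ a < n.toNat + 1, 2 ≤ a → vowel.toNat < (dp0.getD a []).length)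
    (i : Int) (hi : 2 ≤ i) (hin : i ≤ n) :
    ∀ k : Nat, (k : Int) + 1 ≤ vowel →
      ∀ dp : List (List Int), FillInv dp0 n vowel i 1 dp →
      FillInv dp0 n vowel i ((k : Int) + 1)
        ((PySem.List.pyRange 2 ((k : Int) + 2) 1).foldl (fillStep i) dp) := by
  intro k
  induction k with
  | zero =>
    intro _ dp hdp
    rw [show ((0 : Nat) : Int) + 2 = 2 by norm_num, PySem.List.pyRange_one_eq_nil (le_refl 2),
      List.foldl_nil, show ((0 : Nat) : Int) + 1 = 1 by norm_num]
    exact hdp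
  | succ k ih =>
    intro hk dp hdp
    rw [show (((k + 1 : Nat) : Int)) + 2 = ((k : Int) + 2) + 1 by push_cast; ring,
      PySem.List.pyRange_one_succ_right (a := 2) (b := (k : Int) + 2) (by omega),
      List.foldl_append, List.foldl_cons, List.foldl_nil]
    have h1 := ih (by omega) dp hdp
    have := fillStep_inv dp0 n vowel hn hv hlen hrows i ((k : Int) + 2) hi hin (by omega)
      (by push_cast at hk ⊢; omega) _ (by
        rw [show (k : Int) + 2 - 1 = (k : Int) + 1 by ring]; exact h1)
    rw [show ((k : Int) + 2) = ((k + 1 : Nat) : Int) + 1 by push_cast; ring] at this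
    exact this

-- the outer loop: processes rows 2..n
lemma outer_fill (dp0 : List (List Int)) (n vowel : Int) (hn : 2 ≤ n) (hv : 2 ≤ vowel)
    (hlen : n.toNat < dp0.length)
    (hrows : ∀ a < n.toNat + 1, 2 ≤ a → vowel.toNat < (dp0.getD a []).length) :
    ∀ k : Nat, (k : Int) + 2 ≤ n + 1 →
      FillInv dp0 n vowel ((k : Int) + 1) vowel
        ((PySem.List.pyRange 2 ((k : Int) + 2) 1).foldl (fun dp i =>
          (PySem.List.pyRange 2 (vowel + 1) 1).foldl (fillStep i) dp) dp0) := by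
  intro k
  induction k with
  | zero =>
    intro _
    rw [show ((0 : Nat) : Int) + 2 = 2 by norm_num, PySem.List.pyRange_one_eq_nil (le_refl 2),
      List.foldl_nil, show ((0 : Nat) : Int) + 1 = 1 by norm_num]
    refine ⟨rfl, fun _ => rfl, ?_, fun _ _ => Or.inl rfl⟩
    intro a b ha _ hb _
    rw [if_neg (by rintro (h | ⟨h, _⟩) <;> omega)]
  | succ k ih =>
    intro hk
    rw [show (((k + 1 : Nat) : Int)) + 2 = ((k : Int) + 2) + 1 by push_cast; ring,
      PySem.List.pyRange_one_succ_right (a := 2) (b := (k : Int) + 2) (by omega),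
      List.foldl_append, List.foldl_cons, List.foldl_nil]
    have hprev := ih (by omega)
    -- shift the marker from ((k+1), vowel) to ((k+2), 1): same processed set
    have hstart : FillInv dp0 n vowel ((k : Int) + 2) 1
        ((PySem.List.pyRange 2 ((k : Int) + 2) 1).foldl (fun dp i =>
          (PySem.List.pyRange 2 (vowel + 1) 1).foldl (fillStep i) dp) dp0) := by
      obtain ⟨hL, hRw, hCell, hMem⟩ := hprev
      refine ⟨hL, hRw, ?_, hMem⟩
      intro a b ha han hb hbv
      have := hCell a b ha han hb hbv
      by_cases hcase : a < (k : Int) + 1 ∨ (a = (k : Int) + 1 ∧ b ≤ vowel)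
      · rw [if_pos hcase] at this
        rw [this, if_pos (by rcases hcase with h | ⟨h, _⟩ <;> [exact Or.inl (by omega); exact Or.inl (by omega)])]
      · rw [if_neg hcase] at this
        rw [this, if_neg (by
          rintro (h | ⟨h, h'⟩)
          · exact hcase (by omega)
          · omega)]
    have hfin := inner_fill dp0 n vowel hn hv hlen hrows ((k : Int) + 2) (by omega)
      (by push_cast at hk ⊢; omega) (vowel.toNat - 1) (by omega) _ hstart
    rw [show ((vowel.toNat - 1 : Nat) : Int) + 2 = vowel + 1 by omega,
      show ((vowel.toNat - 1 : Nat) : Int) + 1 = vowel by omega] at hfin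
    rw [show (((k + 1 : Nat) : Int)) + 1 = ((k : Int) + 2) by push_cast; ring]
    exact hfin

-- ===== VERDICT (by name: the statements are the Claim_ definitions above) =====
theorem solve_spec : Claim_equal_solve := by
  intro n vowel dp _hD hP
  unfold Spec_solve
  rcases hP with h1 | h1 | ⟨hn, hv, hlen, hrows⟩ | htop
  · subst h1
    simp [solve, solveSt, solve_alt]
  · subst h1
    by_cases hn1 : n = 1
    · subst hn1; simp [solve, solveSt, solve_alt]
    · simp [solve, solveSt, solve_alt, hn1]
  · -- rectangle fully in range: A = fDP = B's fill
    have hn1 : n ≠ 1 := by omega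
    have hv1 : vowel ≠ 1 := by omega
    have hiLt : n.toNat < dp.length := hlen
    have hr := hrows n.toNat (by omega) (by omega)
    have hget1 : PySem.List.pyGet? dp n = some (dp.getD n.toNat []) := by
      rw [PySem.List.pyGet?_eq_some_getElem dp (by omega) (by exact_mod_cast by omega),
        List.getD_eq_getElem dp [] hiLt]
    have hget2 : PySem.List.pyGet? (dp.getD n.toNat []) vowel
        = some ((dp.getD n.toNat []).getD vowel.toNat 0) := by
      rw [PySem.List.pyGet?_eq_some_getElem _ (by omega) (by exact_mod_cast by omega),
        List.getD_eq_getElem _ 0 (by omega)]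
    have hMemInv : MemInv dp dp := ⟨rfl, fun _ => rfl, fun _ _ => Or.inl rfl⟩
    have hA := solveSt_main dp n vowel hn hv hlen hrows (n.toNat + vowel.toNat + 1)
      n vowel dp hMemInv (by omega) (le_refl n) (by omega) (le_refl vowel) (by omega)
    rw [solve, hA.1]
    rw [show solveSt (n.toNat + vowel.toNat + 1) n vowel dp
      = solveSt ((n.toNat + vowel.toNat) + 1) n vowel dp by rfl] at hA
    simp only [solve_alt, if_neg hn1, if_neg hv1, hget1, hget2]
    by_cases hz : (dp.getD n.toNat []).getD vowel.toNat 0 ≠ 0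
    · simp only [if_pos hz]
      exact fDP_of_cell_ne dp n vowel (by omega) (by omega) hz
    · simp only [if_neg hz]
      rw [not_not] at hz
      have hfill := outer_fill dp n vowel hn hv hlen hrows (n.toNat - 1) (by omega)
      rw [show ((n.toNat - 1 : Nat) : Int) + 2 = n + 1 by omega,
        show ((n.toNat - 1 : Nat) : Int) + 1 = n by omega] at hfill
      obtain ⟨_, _, hCell, _⟩ := hfill
      have := hCell n vowel (by omega) (le_refl n) (by omega) (le_refl vowel)
      rw [if_pos (Or.inr ⟨rfl, le_refl _⟩)] at this
      have hfold_eq : (PySem.List.pyRange 2 (n + 1) 1).foldl (fun dp i =>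
            (PySem.List.pyRange 2 (vowel + 1) 1).foldl (fillStep i) dp) dp
          = (PySem.List.pyRange 2 (n + 1) 1).foldl (fun dp i =>
            (PySem.List.pyRange 2 (vowel + 1) 1).foldl (fun dp j =>
              if PySem.List.pyGetD (PySem.List.pyGetD dp i []) j 0 = 0 then
                let above := if i = 2 then j
                  else PySem.List.pyGetD (PySem.List.pyGetD dp (i - 1) []) j 0
                let left := if j = 2 then 1
                  else PySem.List.pyGetD (PySem.List.pyGetD dp i []) (j - 1) 0
                PySem.List.pySetD dp i
                  (PySem.List.pySetD (PySem.List.pyGetD dp i []) j (above + left))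
              else dp) dp) dp := rfl
      rw [← hfold_eq, get2_nonneg _ n vowel (by omega) (by omega), this]
  · -- nonzero cached dp[n][vowel] (Python indexing): both return it at once
    by_cases hn1 : n = 1
    · subst hn1; simp [solve, solveSt, solve_alt]
    · by_cases hv1 : vowel = 1
      · subst hv1; simp [solve, solveSt, solve_alt, hn1]
      · unfold topCell at htop
        rcases hrow : PySem.List.pyGet? dp n with _ | row
        · rw [hrow] at htop
          simp only [Option.getD_none] at htop
          rw [show PySem.List.pyGet? ([] : List Int) vowel = none by
            rw [PySem.List.pyGet?_eq_none_iff]; simp [PySem.Raise.InRange]] at htop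
          simp at htop
        · rw [hrow] at htop
          simp only [Option.getD_some] at htop
          rcases hcell : PySem.List.pyGet? row vowel with _ | v
          · rw [hcell] at htop; simp at htop
          · rw [hcell] at htop
            simp only [Option.getD_some] at htop
            rw [solve, show n.toNat + vowel.toNat + 1 = (n.toNat + vowel.toNat) + 1 by rfl,
              solveSt_succ, solve_alt]
            simp [hn1, hv1, hrow, hcell, htop]
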